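-- pv_equiv track=rewrite | github.com/anishfelixm/100daysofCP | python/48a_1692B_AllDistinct.py | solve
-- ===== SOURCE A (Python) =====
-- def solve(arr, n):
--     cnt = 0
--     hset = set()
--     for i in arr:
--         if i in hset:
--             cnt += 1
--         else:
--             hset.add(i)
--     if cnt % 2 == 0:
--         return len(hset)
--     else:
--         return len(hset) - 1
-- ===== SOURCE B (Python) =====
-- def solve(arr, n):
--     s = sorted(arr)
--     distinct = 0
--     dups = 0
--     prev = None
--     for x in s:
--         if prev is None or x != prev:
--             distinct += 1
--             prev = x
--         else:
--             dups += 1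
--     return distinct - dups % 2
-- ===== Notes on version B (the rewrite author's own statement) =====
-- stated objective: alternative
-- what changed: Replaces A's hash-set membership loop by sorting the array and counting group boundaries against a previous-element sentinel in one linear scan, with no set structure at all.
import Mathlib
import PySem

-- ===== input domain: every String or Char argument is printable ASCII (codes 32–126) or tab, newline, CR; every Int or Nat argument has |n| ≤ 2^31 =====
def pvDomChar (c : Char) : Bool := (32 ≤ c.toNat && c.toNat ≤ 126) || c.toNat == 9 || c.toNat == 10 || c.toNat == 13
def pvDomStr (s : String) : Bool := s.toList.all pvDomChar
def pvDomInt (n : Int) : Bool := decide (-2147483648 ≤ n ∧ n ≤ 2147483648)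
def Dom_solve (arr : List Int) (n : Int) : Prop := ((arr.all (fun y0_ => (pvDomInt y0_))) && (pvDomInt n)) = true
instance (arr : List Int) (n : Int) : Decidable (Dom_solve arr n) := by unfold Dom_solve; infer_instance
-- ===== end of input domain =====

-- B replaces A's hash-set membership loop by sort-then-scan: sort, then count group boundaries against a prev sentinel (alternative algorithm).


-- ===== PORT A =====
-- cnt = 0; hset = set(); for i in arr: if i in hset: cnt += 1 else: hset.add(i)
def solveStep (st : Int × PySem.Set Int) (i : Int) : Int × PySem.Set Int :=
  if PySem.Set.contains st.2 i then (st.1 + 1, st.2) else (st.1, PySem.Set.add st.2 i)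

def solve (arr : List Int) (n : Int) : Int :=
  if PySem.Int.mod (arr.foldl solveStep (0, PySem.Set.empty)).1 2 = 0 then
    PySem.Set.len (arr.foldl solveStep (0, PySem.Set.empty)).2
  else
    PySem.Set.len (arr.foldl solveStep (0, PySem.Set.empty)).2 - 1

-- ===== PORT B =====
-- state = (distinct, dups, prev); for x in sorted(arr): if prev is None or x != prev: distinct += 1; prev = x else: dups += 1
def solveAltStep (st : Int × Int × Option Int) (x : Int) : Int × Int × Option Int :=
  if st.2.2 = none ∨ st.2.2 ≠ some x then (st.1 + 1, st.2.1, some x)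
  else (st.1, st.2.1 + 1, st.2.2)

def solve_alt (arr : List Int) (n : Int) : Int :=
  let st := (PySem.List.sorted arr (fun x => x) false).foldl solveAltStep (0, 0, none)
  st.1 - PySem.Int.mod st.2.1 2

-- ===== PRECONDITION & SPEC =====
def Spec_solve (arr : List Int) (n : Int) (out : Int) : Prop := out = solve_alt arr n
instance (arr : List Int) (n : Int) (out : Int) : Decidable (Spec_solve arr n out) := by unfold Spec_solve; infer_instance

-- ===== CLAIM (what is proved, stated in full; the proofs are below) =====
def Claim_equal_solve : Prop := ∀ (arr : List Int) (n : Int), Dom_solve arr n → Spec_solve arr n (solve arr n)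

-- ===== LEMMAS AND PROOFS =====

-- ----- A side -----

-- The fold's set component is exactly Set.update of the start set with arr.
theorem solveStep_snd (arr : List Int) (c : Int) (s : PySem.Set Int) :
    (arr.foldl solveStep (c, s)).2 = PySem.Set.update s arr := by
  induction arr generalizing c s with
  | nil => simp [PySem.Set.update]
  | cons i t ih =>
    simp only [List.foldl_cons, solveStep]
    by_cases h : i ∈ s
    · simp [h, ih, PySem.Set.update, PySem.Set.add, PySem.Set.contains]
    · simp [h, ih, PySem.Set.update, PySem.Set.add, PySem.Set.contains]

-- Invariant: counter plus set size grows by exactly one per element.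
theorem solveStep_inv (arr : List Int) (c : Int) (s : PySem.Set Int) :
    (arr.foldl solveStep (c, s)).1 + ((arr.foldl solveStep (c, s)).2.length : Int)
      = c + (s.length : Int) + arr.length := by
  induction arr generalizing c s with
  | nil => simp
  | cons i t ih =>
    simp only [List.foldl_cons, solveStep]
    by_cases h : PySem.Set.contains s i = true
    · simp only [if_pos h]
      rw [ih]; simp only [List.length_cons]; push_cast; ring
    · simp only [if_neg h]
      rw [ih]
      simp only [PySem.Set.add, if_neg h, List.length_append, List.length_cons,
        List.length_nil]
      push_cast; ring

-- |set(arr)| = number of distinct elements of arr.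
theorem ofList_length_eq_card (arr : List Int) :
    (PySem.Set.ofList arr).length = arr.toFinset.card := by
  rw [← List.toFinset_card_of_nodup (PySem.Set.nodup_ofList arr)]
  congr 1
  ext x
  simp [PySem.Set.mem_ofList]

-- ----- B side -----

-- Spec of the scan's distinct counter, as a pure recursion on (prev, rest).
def bCount (prev : Option Int) : List Int → Nat
  | [] => 0
  | x :: t => (if prev = none ∨ prev ≠ some x then 1 else 0) + bCount (some x) t

-- The fold computes (d + bCount, du + (len - bCount)) from start (d, du, prev).
theorem foldl_solveAltStep (l : List Int) (d du : Int) (prev : Option Int) :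
    (l.foldl solveAltStep (d, du, prev)).1 = d + (bCount prev l : Int) ∧
    (l.foldl solveAltStep (d, du, prev)).2.1 = du + (l.length : Int) - (bCount prev l : Int) := by
  induction l generalizing d du prev with
  | nil => simp [bCount]
  | cons x t ih =>
    simp only [List.foldl_cons, solveAltStep, bCount]
    by_cases h : prev = none ∨ prev ≠ some x
    · simp only [if_pos h]
      obtain ⟨h1, h2⟩ := ih (d + 1) du (some x)
      constructor
      · rw [h1]; push_cast [List.length_cons]; ring
      · rw [h2]; push_cast [List.length_cons]; ring
    · simp only [if_neg h]
      push_neg at h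
      rw [h.2]
      obtain ⟨h1, h2⟩ := ih d (du + 1) (some x)
      constructor
      · rw [h1]; push_cast [List.length_cons]; ring
      · rw [h2]; push_cast [List.length_cons]; ring

-- Inserting y into a finset grows the card of the finset-minus-{y} by one.
theorem card_insert_sdiff (y : Int) (s : Finset Int) :
    (insert y s).card = (s \ {y}).card + 1 := by
  rw [Finset.sdiff_singleton_eq_erase]
  by_cases hy : y ∈ s
  · rw [Finset.insert_eq_self.mpr hy, ← Finset.card_erase_add_one hy]
  · rw [Finset.card_insert_of_notMem hy, Finset.erase_eq_of_notMem hy]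

-- On a sorted tail whose elements all dominate p, the scan counts the elements ≠ p.
theorem bCount_some (l : List Int) (p : Int)
    (hs : l.Pairwise (· ≤ ·)) (hp : ∀ y ∈ l, p ≤ y) :
    bCount (some p) l = (l.toFinset \ {p}).card := by
  induction l generalizing p with
  | nil => simp [bCount]
  | cons y t ih =>
    have hst : t.Pairwise (· ≤ ·) := (List.pairwise_cons.mp hs).2
    have hyt : ∀ z ∈ t, y ≤ z := (List.pairwise_cons.mp hs).1
    by_cases hyp : y = p
    · subst hyp
      have h1 : bCount (some y) (y :: t) = bCount (some y) t := by simp [bCount]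
      rw [h1, ih y hst hyt]
      congr 1
      simp [Finset.sdiff_singleton_eq_erase, List.toFinset_cons, Finset.erase_insert_eq_erase]
    · have hne : (some p : Option Int) ≠ some y := by simp [Ne.symm hyp]
      have h1 : bCount (some p) (y :: t) = 1 + bCount (some y) t := by
        simp [bCount, hne]
      rw [h1, ih y hst hyt]
      have hpy : p < y := lt_of_le_of_ne (hp y (List.mem_cons_self)) (Ne.symm hyp)
      have hpt : p ∉ (y :: t).toFinset := by
        simp only [List.mem_toFinset, List.mem_cons]
        rintro (h | h)
        · exact hyp h.symm
        · exact absurd (hyt p h) (not_le.mpr hpy)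
      have h2 : ((y :: t).toFinset \ ({p} : Finset Int)) = (y :: t).toFinset := by
        rw [Finset.sdiff_singleton_eq_erase, Finset.erase_eq_of_notMem hpt]
      rw [h2, List.toFinset_cons, card_insert_sdiff, Finset.sdiff_singleton_eq_erase]
      omega

-- On a sorted list started with prev = None, the scan counts all distinct elements.
theorem bCount_none (l : List Int) (hs : l.Pairwise (· ≤ ·)) :
    bCount none l = l.toFinset.card := by
  cases l with
  | nil => simp [bCount]
  | cons x t =>
    have hst : t.Pairwise (· ≤ ·) := (List.pairwise_cons.mp hs).2
    have hxt : ∀ z ∈ t, x ≤ z := (List.pairwise_cons.mp hs).1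
    have h1 : bCount none (x :: t) = 1 + bCount (some x) t := by simp [bCount]
    rw [h1, bCount_some t x hst hxt, List.toFinset_cons, card_insert_sdiff]
    omega

-- ===== VERDICT (by name: the statement is the Claim_ definition above) =====
theorem solve_spec : Claim_equal_solve := by
  intro arr n _
  unfold Spec_solve solve solve_alt
  have hset : (arr.foldl solveStep (0, PySem.Set.empty)).2 = PySem.Set.ofList arr := by
    rw [solveStep_snd, PySem.Set.ofList_eq_foldl]
    rfl
  have hD : ((PySem.Set.ofList arr).length : Int) = (arr.toFinset.card : Int) := by
    exact_mod_cast ofList_length_eq_card arr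
  have hcnt : (arr.foldl solveStep (0, PySem.Set.empty)).1
      = (arr.length : Int) - (arr.toFinset.card : Int) := by
    have h := solveStep_inv arr 0 PySem.Set.empty
    rw [hset] at h
    rw [show (PySem.Set.empty : PySem.Set Int).length = 0 from rfl] at h
    omega
  -- B side
  have hsp : (PySem.List.sorted arr (fun x => x) false).Pairwise (· ≤ ·) :=
    PySem.List.sorted_pairwise arr (fun x => x)
  have hperm : (PySem.List.sorted arr (fun x => x) false).Perm arr :=
    PySem.List.sorted_perm arr (fun x => x) false
  have hfin : (PySem.List.sorted arr (fun x => x) false).toFinset = arr.toFinset :=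
    List.toFinset_eq_of_perm _ _ hperm
  have hlen : (PySem.List.sorted arr (fun x => x) false).length = arr.length :=
    hperm.length_eq
  obtain ⟨hb1, hb2⟩ :=
    foldl_solveAltStep (PySem.List.sorted arr (fun x => x) false) 0 0 none
  rw [bCount_none _ hsp, hfin] at hb1 hb2
  simp only [hb1, hb2, hlen, hset, hcnt, zero_add]
  have hmod := PySem.Int.mod_eq_emod_of_pos
    (a := (arr.length : Int) - (arr.toFinset.card : Int)) (b := 2) (by norm_num)
  have hcard_le : arr.toFinset.card ≤ arr.length := arr.toFinset_card_le
  have hsetlen : PySem.Set.len (PySem.Set.ofList arr) = ((PySem.Set.ofList arr).length : Int) := by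
    simp [PySem.Set.len]
  rw [hsetlen, hD, hmod]
  rcases Int.emod_two_eq_zero_or_one ((arr.length : Int) - (arr.toFinset.card : Int)) with h | h <;>
    simp [h]
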